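-- pv_equiv track=rewrite | github.com/tanypteryx/AdventOfCode | 2023/Day05/day05.py | interval_operations
-- ===== SOURCE A (Python) =====
-- def interval_operations(interval, other_intervals):
--     def intersect(a, b):
--         return [max(a[0], b[0]), min(a[1], b[1]), b[2], b[3]]
--
--     def is_valid_interval(i):
--         return i[0] <= i[1]
--
--     # Calculate Intersection
--     intersections = []
--     for other in other_intervals:
--         inter = intersect(interval, other)
--         if is_valid_interval(inter):
--             intersections.append(inter)
--
--     # Sort other_intervals for complement calculation
--     other_intervals = sorted(other_intervals, key=lambda x: x[0])
--
--     # Calculate Complement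
--     complement = []
--     current_start = interval[0]
--
--     for other in other_intervals:
--         inter = intersect(interval, other)
--         if is_valid_interval(inter):
--             if current_start < inter[0]:
--                 complement.append([current_start, inter[0] - 1])
--             current_start = max(current_start, inter[1] + 1)
--
--     if current_start <= interval[1]:
--         complement.append([current_start, interval[1]])
--
--     return intersections, complement
-- ===== SOURCE B (Python) =====
-- def interval_operations(interval, other_intervals):
--     lo, hi = interval[0], interval[1]
--
--     # Intersections: one comprehension, clipping each interval to [lo, hi].
--     intersections = [[max(lo, o[0]), min(hi, o[1]), o[2], o[3]]
--                      for o in other_intervals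
--                      if max(lo, o[0]) <= min(hi, o[1])]
--
--     # Complement by repeated interval subtraction (no sorting, no sweep):
--     # start from [lo, hi] and carve every other interval out of the
--     # remaining segments; the segment list stays sorted and disjoint.
--     remaining = [[lo, hi]] if lo <= hi else []
--     for o in other_intervals:
--         s, e = o[0], o[1]
--         carved = []
--         for a, b in remaining:
--             if e < s or e < a or b < s:
--                 carved.append([a, b])
--             else:
--                 if a < s:
--                     carved.append([a, s - 1])
--                 if e < b:
--                     carved.append([e + 1, b])
--         remaining = carved
--     return intersections, remaining
-- ===== Notes on version B (the rewrite author's own statement) =====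
-- stated objective: alternative
-- what changed: B computes the complement by interval subtraction -- starting from [lo,hi] it carves each other interval out of the remaining segment list -- instead of A's sort-then-sweep over re-intersected intervals; no sorting is performed at all.
import Mathlib
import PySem

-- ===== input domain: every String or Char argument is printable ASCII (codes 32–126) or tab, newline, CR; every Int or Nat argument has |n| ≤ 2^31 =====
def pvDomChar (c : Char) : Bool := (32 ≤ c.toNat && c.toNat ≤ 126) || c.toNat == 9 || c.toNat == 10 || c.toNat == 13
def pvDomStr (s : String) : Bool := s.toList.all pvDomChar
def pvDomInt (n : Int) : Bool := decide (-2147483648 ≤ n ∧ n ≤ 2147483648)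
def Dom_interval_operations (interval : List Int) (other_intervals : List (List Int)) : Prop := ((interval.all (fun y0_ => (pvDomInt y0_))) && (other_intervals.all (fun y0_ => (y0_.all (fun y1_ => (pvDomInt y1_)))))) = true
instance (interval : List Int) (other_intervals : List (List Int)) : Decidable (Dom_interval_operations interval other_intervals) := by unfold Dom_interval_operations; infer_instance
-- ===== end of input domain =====

-- B derives the complement by interval subtraction (carving each other interval out of
-- the remaining segments of [lo,hi]) instead of A's sort-then-sweep (objective: alternative).

-- xs[i] for a nonnegative literal index; exact under Pre_ (index in range, so the default never fires)
def pvGet (xs : List Int) (i : Nat) : Int := PySem.List.pyGetD xs (i : Int) 0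

-- ===== PORT A =====
def pvInterA (a b : List Int) : List Int :=
  [max (pvGet a 0) (pvGet b 0), min (pvGet a 1) (pvGet b 1), pvGet b 2, pvGet b 3]

def pvValidA (i : List Int) : Bool := decide (pvGet i 0 ≤ pvGet i 1)

def interval_operations (interval : List Int) (other_intervals : List (List Int)) : List (List Int) × List (List Int) :=
  let intersections := other_intervals.foldl (fun acc other =>
      if pvValidA (pvInterA interval other) then acc ++ [pvInterA interval other] else acc) []
  let sortedOthers := PySem.List.sorted other_intervals (fun x => pvGet x 0) false
  let st := sortedOthers.foldl (fun (st : List (List Int) × Int) other =>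
      if pvValidA (pvInterA interval other) then
        ((if st.2 < pvGet (pvInterA interval other) 0 then
            st.1 ++ [[st.2, pvGet (pvInterA interval other) 0 - 1]] else st.1),
         max st.2 (pvGet (pvInterA interval other) 1 + 1))
      else st) ([], pvGet interval 0)
  let complement := if st.2 ≤ pvGet interval 1 then st.1 ++ [[st.2, pvGet interval 1]] else st.1
  (intersections, complement)

-- ===== PORT B =====
def interval_operations_alt (interval : List Int) (other_intervals : List (List Int)) : List (List Int) × List (List Int) :=
  let lo := pvGet interval 0
  let hi := pvGet interval 1
  let intersections := (other_intervals.filter (fun o =>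
      decide (max lo (pvGet o 0) ≤ min hi (pvGet o 1)))).map (fun o =>
      [max lo (pvGet o 0), min hi (pvGet o 1), pvGet o 2, pvGet o 3])
  let remaining := other_intervals.foldl (fun (segs : List (List Int)) o =>
      segs.foldl (fun acc seg =>
        if pvGet o 1 < pvGet o 0 ∨ pvGet o 1 < pvGet seg 0 ∨ pvGet seg 1 < pvGet o 0 then
          acc ++ [[pvGet seg 0, pvGet seg 1]]
        else
          (if pvGet seg 0 < pvGet o 0 then acc ++ [[pvGet seg 0, pvGet o 0 - 1]] else acc) ++
          (if pvGet o 1 < pvGet seg 1 then [[pvGet o 1 + 1, pvGet seg 1]] else [])) [])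
      (if lo ≤ hi then [[lo, hi]] else [])
  (intersections, remaining)

-- ===== PRECONDITION & SPEC =====
-- Pre_ excludes exactly the inputs where Python A raises IndexError:
-- interval needs indices 0 and 1, every other interval needs indices 0..3.
def Pre_interval_operations (interval : List Int) (other_intervals : List (List Int)) : Prop :=
  2 ≤ interval.length ∧ ∀ o ∈ other_intervals, 4 ≤ o.length
instance (interval : List Int) (other_intervals : List (List Int)) : Decidable (Pre_interval_operations interval other_intervals) := by unfold Pre_interval_operations; infer_instance

def pvWitness_interval_operations : List Int × List (List Int) := ([0, 10], [[2, 5, 1, 1]])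

def Spec_interval_operations (interval : List Int) (other_intervals : List (List Int)) (out : List (List Int) × List (List Int)) : Prop := out = interval_operations_alt interval other_intervals
instance (interval : List Int) (other_intervals : List (List Int)) (out : List (List Int) × List (List Int)) : Decidable (Spec_interval_operations interval other_intervals out) := by unfold Spec_interval_operations; infer_instance

-- ===== CLAIM (what is proved, stated in full; the proofs are below) =====
def Claim_equal_interval_operations : Prop := ∀ (interval : List Int) (other_intervals : List (List Int)), Dom_interval_operations interval other_intervals → Pre_interval_operations interval other_intervals → Spec_interval_operations interval other_intervals (interval_operations interval other_intervals)

-- ===== LEMMAS AND PROOFS =====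

-- Pair world: segments as (start, end) pairs; pvSeg renders one back as a Python list.
def pvSeg (p : Int × Int) : List Int := [p.1, p.2]

-- One subtraction step of B, on pairs.
def pvSubP (s e : Int) (segs : List (Int × Int)) : List (Int × Int) :=
  segs.flatMap (fun p =>
    if e < s ∨ e < p.1 ∨ p.2 < s then [p]
    else (if p.1 < s then [(p.1, s - 1)] else []) ++ (if e < p.2 then [(e + 1, p.2)] else []))

-- x lies in (the set denoted by) a segment list.
def pvCovers (segs : List (Int × Int)) (x : Int) : Prop := ∃ p ∈ segs, p.1 ≤ x ∧ x ≤ p.2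

-- Normal form: valid segments, strictly separated (not even adjacent), sorted.
def pvNF (segs : List (Int × Int)) : Prop :=
  segs.Pairwise (fun p q => p.2 + 1 < q.1) ∧ ∀ p ∈ segs, p.1 ≤ p.2

-- A's sweep, on pairs.
def pvGapsP (hi : Int) (c : Int) : List (Int × Int) → List (Int × Int)
  | [] => if c ≤ hi then [(c, hi)] else []
  | (s, e) :: t => (if c < s then [(c, s - 1)] else []) ++ pvGapsP hi (max c (e + 1)) t

theorem pvCovers_append (u v : List (Int × Int)) (x : Int) :
    pvCovers (u ++ v) x ↔ pvCovers u x ∨ pvCovers v x := by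
  simp [pvCovers, List.mem_append, or_and_right, exists_or]

-- A's complement loop computes pvGapsP over the filtered clipped pairs of the list it scans.
theorem pvLoopA_eq_gaps (interval : List Int) :
    ∀ (l : List (List Int)) (acc : List (List Int)) (c : Int),
      (if (l.foldl (fun (st : List (List Int) × Int) other =>
            if pvValidA (pvInterA interval other) then
              ((if st.2 < pvGet (pvInterA interval other) 0 then
                  st.1 ++ [[st.2, pvGet (pvInterA interval other) 0 - 1]] else st.1),
               max st.2 (pvGet (pvInterA interval other) 1 + 1))
            else st) (acc, c)).2 ≤ pvGet interval 1 then
         (l.foldl (fun (st : List (List Int) × Int) other =>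
            if pvValidA (pvInterA interval other) then
              ((if st.2 < pvGet (pvInterA interval other) 0 then
                  st.1 ++ [[st.2, pvGet (pvInterA interval other) 0 - 1]] else st.1),
               max st.2 (pvGet (pvInterA interval other) 1 + 1))
            else st) (acc, c)).1 ++ [[(l.foldl (fun (st : List (List Int) × Int) other =>
            if pvValidA (pvInterA interval other) then
              ((if st.2 < pvGet (pvInterA interval other) 0 then
                  st.1 ++ [[st.2, pvGet (pvInterA interval other) 0 - 1]] else st.1),
               max st.2 (pvGet (pvInterA interval other) 1 + 1))
            else st) (acc, c)).2, pvGet interval 1]]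
       else (l.foldl (fun (st : List (List Int) × Int) other =>
            if pvValidA (pvInterA interval other) then
              ((if st.2 < pvGet (pvInterA interval other) 0 then
                  st.1 ++ [[st.2, pvGet (pvInterA interval other) 0 - 1]] else st.1),
               max st.2 (pvGet (pvInterA interval other) 1 + 1))
            else st) (acc, c)).1)
      = acc ++ (pvGapsP (pvGet interval 1) c
          ((l.map (fun o => (max (pvGet interval 0) (pvGet o 0), min (pvGet interval 1) (pvGet o 1)))).filter
            (fun p => decide (p.1 ≤ p.2)))).map pvSeg := by
  intro l
  induction l with
  | nil =>
    intro acc c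
    simp only [List.foldl_nil, List.map_nil, List.filter_nil, pvGapsP]
    split_ifs <;> simp [pvSeg]
  | cons o t ih =>
    intro acc c
    simp only [List.foldl_cons, List.map_cons, List.filter_cons]
    have h0 : pvGet (pvInterA interval o) 0 = max (pvGet interval 0) (pvGet o 0) := rfl
    have h1 : pvGet (pvInterA interval o) 1 = min (pvGet interval 1) (pvGet o 1) := rfl
    have hv : pvValidA (pvInterA interval o)
        = decide ((max (pvGet interval 0) (pvGet o 0)) ≤ (min (pvGet interval 1) (pvGet o 1))) := rfl
    by_cases hc : max (pvGet interval 0) (pvGet o 0) ≤ min (pvGet interval 1) (pvGet o 1)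
    · simp only [hv, hc, decide_true, if_true, h0, h1, ih, pvGapsP]
      by_cases hcs : c < max (pvGet interval 0) (pvGet o 0)
      · simp [hcs, pvSeg, List.append_assoc]
      · simp [hcs]
    · simp only [hv, hc, decide_false, Bool.false_eq_true, if_false, ih]

-- B's inner loop over a rendered segment list is pvSubP, rendered.
theorem pvInnerB_eq_subP (o : List Int) :
    ∀ (segsP : List (Int × Int)) (acc : List (List Int)),
      (segsP.map pvSeg).foldl (fun acc seg =>
        if pvGet o 1 < pvGet o 0 ∨ pvGet o 1 < pvGet seg 0 ∨ pvGet seg 1 < pvGet o 0 then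
          acc ++ [[pvGet seg 0, pvGet seg 1]]
        else
          (if pvGet seg 0 < pvGet o 0 then acc ++ [[pvGet seg 0, pvGet o 0 - 1]] else acc) ++
          (if pvGet o 1 < pvGet seg 1 then [[pvGet o 1 + 1, pvGet seg 1]] else [])) acc
      = acc ++ (pvSubP (pvGet o 0) (pvGet o 1) segsP).map pvSeg := by
  intro segsP
  induction segsP with
  | nil => intro acc; simp [pvSubP]
  | cons p t ih =>
    intro acc
    have hg0 : pvGet (pvSeg p) 0 = p.1 := rfl
    have hg1 : pvGet (pvSeg p) 1 = p.2 := rfl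
    simp only [List.map_cons, List.foldl_cons, hg0, hg1, ih, pvSubP, List.flatMap_cons,
      List.map_append]
    split_ifs <;> simp [pvSeg, List.append_assoc]

-- B's outer loop, on pairs.
theorem pvOuterB_eq_foldP (osl : List (List Int)) :
    ∀ (segsP : List (Int × Int)),
      osl.foldl (fun (segs : List (List Int)) o =>
        segs.foldl (fun acc seg =>
          if pvGet o 1 < pvGet o 0 ∨ pvGet o 1 < pvGet seg 0 ∨ pvGet seg 1 < pvGet o 0 then
            acc ++ [[pvGet seg 0, pvGet seg 1]]
          else
            (if pvGet seg 0 < pvGet o 0 then acc ++ [[pvGet seg 0, pvGet o 0 - 1]] else acc) ++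
            (if pvGet o 1 < pvGet seg 1 then [[pvGet o 1 + 1, pvGet seg 1]] else [])) [])
        (segsP.map pvSeg)
      = (osl.foldl (fun sp o => pvSubP (pvGet o 0) (pvGet o 1) sp) segsP).map pvSeg := by
  induction osl with
  | nil => intro segsP; simp
  | cons o t ih =>
    intro segsP
    simp only [List.foldl_cons]
    rw [show ((segsP.map pvSeg).foldl _ ([] : List (List Int)))
        = [] ++ (pvSubP (pvGet o 0) (pvGet o 1) segsP).map pvSeg from pvInnerB_eq_subP o segsP [],
      List.nil_append, ih]

-- Membership through one subtraction step.
theorem pvCovers_subP (s e x : Int) :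
    ∀ segs, pvCovers (pvSubP s e segs) x ↔ pvCovers segs x ∧ ¬(s ≤ x ∧ x ≤ e) := by
  intro segs
  induction segs with
  | nil => simp [pvCovers, pvSubP]
  | cons p t ih =>
    have hstep : pvSubP s e (p :: t)
        = (if e < s ∨ e < p.1 ∨ p.2 < s then [p]
           else (if p.1 < s then [(p.1, s - 1)] else []) ++ (if e < p.2 then [(e + 1, p.2)] else []))
          ++ pvSubP s e t := by simp [pvSubP]
    rw [hstep, pvCovers_append, ih]
    have hhead : pvCovers (p :: t) x ↔ (p.1 ≤ x ∧ x ≤ p.2) ∨ pvCovers t x := by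
      simp [pvCovers, List.mem_cons, or_and_right, exists_or]
    rw [hhead]
    have hpiece : pvCovers
        (if e < s ∨ e < p.1 ∨ p.2 < s then [p]
         else (if p.1 < s then [(p.1, s - 1)] else []) ++ (if e < p.2 then [(e + 1, p.2)] else [])) x
        ↔ ((p.1 ≤ x ∧ x ≤ p.2) ∧ ¬(s ≤ x ∧ x ≤ e)) := by
      split_ifs with h1 h2 h3 <;> simp [pvCovers] <;> omega
    rw [hpiece]
    tauto

-- Every piece produced from a valid segment sits inside it and is valid.
theorem pvSubP_mem_bound (s e : Int) :
    ∀ segs, (∀ p ∈ segs, p.1 ≤ p.2) →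
      ∀ q ∈ pvSubP s e segs, ∃ p ∈ segs, p.1 ≤ q.1 ∧ q.1 ≤ q.2 ∧ q.2 ≤ p.2 := by
  intro segs hval q hq
  rw [pvSubP, List.mem_flatMap] at hq
  obtain ⟨p, hp, hqp⟩ := hq
  refine ⟨p, hp, ?_⟩
  have hv := hval p hp
  split_ifs at hqp with h1 h2 h3 <;> simp at hqp <;> rcases hqp with h | h <;>
    (try obtain ⟨hl, hr⟩ := h) <;> (try subst h) <;> simp_all <;> omega

-- Subtraction preserves normal form.
theorem pvNF_subP (s e : Int) : ∀ segs, pvNF segs → pvNF (pvSubP s e segs) := by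
  intro segs
  induction segs with
  | nil => intro _; simp [pvNF, pvSubP]
  | cons p t ih =>
    intro ⟨hpw, hval⟩
    obtain ⟨hhead, hpwt⟩ := List.pairwise_cons.mp hpw
    have hvt : ∀ r ∈ t, r.1 ≤ r.2 := fun r hr => hval r (List.mem_cons_of_mem _ hr)
    have hnf_t := ih ⟨hpwt, hvt⟩
    have hvp : p.1 ≤ p.2 := hval p List.mem_cons_self
    have hstep : pvSubP s e (p :: t)
        = (if e < s ∨ e < p.1 ∨ p.2 < s then [p]
           else (if p.1 < s then [(p.1, s - 1)] else []) ++ (if e < p.2 then [(e + 1, p.2)] else []))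
          ++ pvSubP s e t := by simp [pvSubP]
    rw [hstep]
    have hpieceIn : ∀ q ∈ (if e < s ∨ e < p.1 ∨ p.2 < s then [p]
           else (if p.1 < s then [(p.1, s - 1)] else []) ++ (if e < p.2 then [(e + 1, p.2)] else [])),
        p.1 ≤ q.1 ∧ q.1 ≤ q.2 ∧ q.2 ≤ p.2 := by
      intro q hq
      split_ifs at hq <;> simp at hq <;> rcases hq with h | h <;>
        (try obtain ⟨hl, hr⟩ := h) <;> (try subst h) <;> simp_all <;> omega
    constructor
    · rw [List.pairwise_append]
      refine ⟨?_, hnf_t.1, ?_⟩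
      · split_ifs <;> simp <;> omega
      · intro q hq q' hq'
        obtain ⟨_, _, hq2⟩ := hpieceIn q hq
        obtain ⟨r, hr, hr1, _, _⟩ := pvSubP_mem_bound s e t hvt q' hq'
        have := hhead r hr
        omega
    · intro q hq
      rcases List.mem_append.mp hq with h | h
      · exact (hpieceIn q h).2.1
      · obtain ⟨r, hr, _, h2, _⟩ := pvSubP_mem_bound s e t hvt q h
        exact h2
-- Membership in A's sweep output.
theorem pvCovers_gapsP (hi x : Int) :
    ∀ (l : List (Int × Int)) (c : Int),
      l.Pairwise (fun p q => p.1 ≤ q.1) →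
      (∀ p ∈ l, p.1 ≤ p.2 ∧ p.2 ≤ hi) →
      (pvCovers (pvGapsP hi c l) x ↔ (c ≤ x ∧ x ≤ hi ∧ ∀ p ∈ l, ¬(p.1 ≤ x ∧ x ≤ p.2))) := by
  intro l
  induction l with
  | nil =>
    intro c _ _
    simp only [pvGapsP]
    split_ifs with h <;> simp [pvCovers] <;> omega
  | cons se t ih =>
    intro c hpw hb
    obtain ⟨s, e⟩ := se
    obtain ⟨hhead, hpwt⟩ := List.pairwise_cons.mp hpw
    have hbt : ∀ p ∈ t, p.1 ≤ p.2 ∧ p.2 ≤ hi := fun p hp => hb p (List.mem_cons_of_mem _ hp)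
    obtain ⟨hse, hehi⟩ := hb (s, e) List.mem_cons_self
    simp only [pvGapsP]
    rw [pvCovers_append, ih (max c (e + 1)) hpwt hbt]
    constructor
    · rintro (hpc | ⟨h1, h2, h3⟩)
      · have hx : c ≤ x ∧ x ≤ s - 1 ∧ c < s := by
          by_cases hcs : c < s
          · simp [hcs, pvCovers] at hpc; omega
          · simp [hcs, pvCovers] at hpc
        refine ⟨hx.1, by omega, ?_⟩
        intro p hp
        rcases List.mem_cons.mp hp with rfl | hp'
        · simp; omega
        · have := hhead p hp'
          simp; omega
      · refine ⟨by omega, h2, ?_⟩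
        intro p hp
        rcases List.mem_cons.mp hp with rfl | hp'
        · simp; omega
        · exact h3 p hp'
    · rintro ⟨h1, h2, h3⟩
      have hns := h3 (s, e) List.mem_cons_self
      simp only [not_and, not_le] at hns
      by_cases hxs : x < s
      · left
        have hcs : c < s := by omega
        simp [hcs, pvCovers]
        omega
      · right
        refine ⟨by omega, h2, fun p hp => h3 p (List.mem_cons_of_mem _ hp)⟩

-- A's sweep output is in normal form, with all segments inside [c, hi].
theorem pvNF_gapsP (hi : Int) :
    ∀ (l : List (Int × Int)) (c : Int),
      l.Pairwise (fun p q => p.1 ≤ q.1) →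
      (∀ p ∈ l, p.1 ≤ p.2 ∧ p.2 ≤ hi) →
      pvNF (pvGapsP hi c l) ∧ ∀ q ∈ pvGapsP hi c l, c ≤ q.1 ∧ q.1 ≤ q.2 ∧ q.2 ≤ hi := by
  intro l
  induction l with
  | nil =>
    intro c _ _
    simp only [pvGapsP]
    split_ifs with h <;> simp [pvNF] <;> omega
  | cons se t ih =>
    intro c hpw hb
    obtain ⟨s, e⟩ := se
    obtain ⟨hhead, hpwt⟩ := List.pairwise_cons.mp hpw
    have hbt : ∀ p ∈ t, p.1 ≤ p.2 ∧ p.2 ≤ hi := fun p hp => hb p (List.mem_cons_of_mem _ hp)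
    obtain ⟨hse, hehi⟩ := hb (s, e) List.mem_cons_self
    obtain ⟨⟨hnf1, hnf2⟩, hbound⟩ := ih (max c (e + 1)) hpwt hbt
    simp only [pvGapsP]
    constructor
    · constructor
      · rw [List.pairwise_append]
        refine ⟨by split_ifs <;> simp, hnf1, ?_⟩
        intro q hq q' hq'
        have hq'' : q = (c, s - 1) ∧ c < s := by
          by_cases hcs : c < s
          · simp [hcs] at hq; exact ⟨hq, hcs⟩
          · simp [hcs] at hq
        obtain ⟨rfl, hcs⟩ := hq''
        have := (hbound q' hq').1
        simp
        omega
      · intro q hq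
        rcases List.mem_append.mp hq with h | h
        · have : q = (c, s - 1) ∧ c < s := by
            by_cases hcs : c < s
            · simp [hcs] at h; exact ⟨h, hcs⟩
            · simp [hcs] at h
          obtain ⟨rfl, hcs⟩ := this
          simp; omega
        · exact hnf2 q h
    · intro q hq
      rcases List.mem_append.mp hq with h | h
      · have : q = (c, s - 1) ∧ c < s := by
          by_cases hcs : c < s
          · simp [hcs] at h; exact ⟨h, hcs⟩
          · simp [hcs] at h
        obtain ⟨rfl, hcs⟩ := this
        simp; omega
      · have := hbound q h
        refine ⟨by omega, this.2.1, this.2.2⟩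

-- Two normal-form segment lists denoting the same set are equal.
theorem pvNF_unique : ∀ (u : List (Int × Int)), pvNF u → ∀ (v : List (Int × Int)), pvNF v →
    (∀ x, pvCovers u x ↔ pvCovers v x) → u = v := by
  intro u
  induction u with
  | nil =>
    intro _ v hv hc
    cases v with
    | nil => rfl
    | cons q v' =>
      exfalso
      have : pvCovers (q :: v') q.1 := ⟨q, List.mem_cons_self, le_refl _, hv.2 q List.mem_cons_self⟩
      obtain ⟨p, hp, _⟩ := (hc q.1).mpr this
      exact absurd hp (List.not_mem_nil)
  | cons p u' ih =>
    intro hu v hv hc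
    cases v with
    | nil =>
      exfalso
      have : pvCovers (p :: u') p.1 := ⟨p, List.mem_cons_self, le_refl _, hu.2 p List.mem_cons_self⟩
      obtain ⟨q, hq, _⟩ := (hc p.1).mp this
      exact absurd hq (List.not_mem_nil)
    | cons q v' =>
      obtain ⟨hupw, huval⟩ := hu
      obtain ⟨hvpw, hvval⟩ := hv
      obtain ⟨huh, hupwt⟩ := List.pairwise_cons.mp hupw
      obtain ⟨hvh, hvpwt⟩ := List.pairwise_cons.mp hvpw
      have hpv : p.1 ≤ p.2 := huval p List.mem_cons_self
      have hqv : q.1 ≤ q.2 := hvval q List.mem_cons_self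
      -- starts agree
      have ha : p.1 = q.1 := by
        obtain ⟨r, hr, hr1, _⟩ := (hc p.1).mp ⟨p, List.mem_cons_self, le_refl _, hpv⟩
        have hq1r : q.1 ≤ r.1 := by
          rcases List.mem_cons.mp hr with rfl | hr'
          · exact le_refl _
          · have := hvh r hr'; omega
        obtain ⟨r', hr', hr1', _⟩ := (hc q.1).mpr ⟨q, List.mem_cons_self, le_refl _, hqv⟩
        have hp1r : p.1 ≤ r'.1 := by
          rcases List.mem_cons.mp hr' with rfl | hr''
          · exact le_refl _
          · have := huh r' hr''; omega
        omega
      -- ends agree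
      have hb : p.2 = q.2 := by
        rcases lt_trichotomy p.2 q.2 with h | h | h
        · exfalso
          have hcv : pvCovers (q :: v') (p.2 + 1) := ⟨q, List.mem_cons_self, by omega, by omega⟩
          obtain ⟨r, hr, hr1, hr2⟩ := (hc (p.2 + 1)).mpr hcv
          rcases List.mem_cons.mp hr with rfl | hr'
          · omega
          · have := huh r hr'; omega
        · exact h
        · exfalso
          have hcv : pvCovers (p :: u') (q.2 + 1) := ⟨p, List.mem_cons_self, by omega, by omega⟩
          obtain ⟨r, hr, hr1, hr2⟩ := (hc (q.2 + 1)).mp hcv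
          rcases List.mem_cons.mp hr with rfl | hr'
          · omega
          · have := hvh r hr'; omega
      have hpq : p = q := Prod.ext ha hb
      subst hpq
      -- tails denote the same set
      have hct : ∀ x, pvCovers u' x ↔ pvCovers v' x := by
        intro x
        constructor
        · rintro ⟨r, hr, hr1, hr2⟩
          have hxbig : p.2 + 1 < x + 1 := by have := huh r hr; omega
          obtain ⟨r', hr', hr1', hr2'⟩ := (hc x).mp ⟨r, List.mem_cons_of_mem _ hr, hr1, hr2⟩
          rcases List.mem_cons.mp hr' with rfl | hr''
          · exfalso; omega
          · exact ⟨r', hr'', hr1', hr2'⟩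
        · rintro ⟨r, hr, hr1, hr2⟩
          have hxbig : p.2 + 1 < x + 1 := by have := hvh r hr; omega
          obtain ⟨r', hr', hr1', hr2'⟩ := (hc x).mpr ⟨r, List.mem_cons_of_mem _ hr, hr1, hr2⟩
          rcases List.mem_cons.mp hr' with rfl | hr''
          · exfalso; omega
          · exact ⟨r', hr'', hr1', hr2'⟩
      have := ih ⟨hupwt, fun r hr => huval r (List.mem_cons_of_mem _ hr)⟩ v'
        ⟨hvpwt, fun r hr => hvval r (List.mem_cons_of_mem _ hr)⟩ hct
      rw [this]

-- B's fold preserves normal form.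
theorem pvNF_foldP : ∀ (osl : List (List Int)) (segsP : List (Int × Int)), pvNF segsP →
    pvNF (osl.foldl (fun sp o => pvSubP (pvGet o 0) (pvGet o 1) sp) segsP) := by
  intro osl
  induction osl with
  | nil => intro segsP h; exact h
  | cons o t ih =>
    intro segsP h
    exact ih _ (pvNF_subP (pvGet o 0) (pvGet o 1) segsP h)

-- Membership in B's fold.
theorem pvCovers_foldP (x : Int) : ∀ (osl : List (List Int)) (segsP : List (Int × Int)),
    pvCovers (osl.foldl (fun sp o => pvSubP (pvGet o 0) (pvGet o 1) sp) segsP) x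
      ↔ pvCovers segsP x ∧ ∀ o ∈ osl, ¬(pvGet o 0 ≤ x ∧ x ≤ pvGet o 1) := by
  intro osl
  induction osl with
  | nil => intro segsP; simp
  | cons o t ih =>
    intro segsP
    simp only [List.foldl_cons]
    rw [ih, pvCovers_subP]
    constructor
    · rintro ⟨⟨h1, h2⟩, h3⟩
      exact ⟨h1, fun o' ho' => by rcases List.mem_cons.mp ho' with rfl | h <;> [exact h2; exact h3 o' h]⟩
    · rintro ⟨h1, h2⟩
      exact ⟨⟨h1, h2 o List.mem_cons_self⟩, fun o' ho' => h2 o' (List.mem_cons_of_mem _ ho')⟩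

-- ===== VERDICT (by name: the statement is the Claim_ definition above) =====
theorem interval_operations_spec : Claim_equal_interval_operations := by
  intro interval other_intervals _ _
  unfold Spec_interval_operations interval_operations interval_operations_alt
  simp only []
  have hAB : other_intervals.foldl (fun acc other =>
        if pvValidA (pvInterA interval other) then acc ++ [pvInterA interval other] else acc) []
      = (other_intervals.filter (fun o =>
          decide (max (pvGet interval 0) (pvGet o 0) ≤ min (pvGet interval 1) (pvGet o 1)))).map
          (fun o => [max (pvGet interval 0) (pvGet o 0), min (pvGet interval 1) (pvGet o 1),
                     pvGet o 2, pvGet o 3]) := by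
    have h := PySem.List.foldl_append_if (fun o => pvValidA (pvInterA interval o))
      (fun o => pvInterA interval o) other_intervals []
    rw [List.nil_append] at h
    exact h
  rw [hAB, Prod.mk.injEq]
  refine ⟨rfl, ?_⟩
  -- A's complement as a rendered sweep
  rw [pvLoopA_eq_gaps interval (PySem.List.sorted other_intervals (fun x => pvGet x 0) false)
        [] (pvGet interval 0), List.nil_append]
  -- B's complement as a rendered subtraction fold
  have hinit : (if pvGet interval 0 ≤ pvGet interval 1
        then [[pvGet interval 0, pvGet interval 1]] else ([] : List (List Int)))
      = ((if pvGet interval 0 ≤ pvGet interval 1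
        then [(pvGet interval 0, pvGet interval 1)] else ([] : List (Int × Int))).map pvSeg) := by
    split_ifs <;> simp [pvSeg]
  rw [hinit, pvOuterB_eq_foldP]
  congr 1
  -- the two pair-level results are both in normal form and denote the same set
  set lo := pvGet interval 0
  set hi := pvGet interval 1
  set pairsA := (((PySem.List.sorted other_intervals (fun x => pvGet x 0) false).map
      (fun o => (max lo (pvGet o 0), min hi (pvGet o 1)))).filter
      (fun p => decide (p.1 ≤ p.2))) with hpairsA
  have hsortedA : pairsA.Pairwise (fun p q => p.1 ≤ q.1) := by
    refine List.Pairwise.filter _ (List.Pairwise.map _ ?_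
      (PySem.List.sorted_pairwise other_intervals (fun x => pvGet x 0)))
    intro a b h
    exact max_le_max le_rfl h
  have hboundA : ∀ p ∈ pairsA, p.1 ≤ p.2 ∧ p.2 ≤ hi := by
    intro p hp
    obtain ⟨hmem, hval⟩ := List.mem_filter.mp hp
    obtain ⟨o, _, rfl⟩ := List.mem_map.mp hmem
    exact ⟨of_decide_eq_true hval, min_le_left _ _⟩
  have hmemA : ∀ p, p ∈ pairsA ↔ ∃ o ∈ other_intervals,
      max lo (pvGet o 0) ≤ min hi (pvGet o 1) ∧ p = (max lo (pvGet o 0), min hi (pvGet o 1)) := by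
    intro p
    rw [hpairsA, List.mem_filter, List.mem_map]
    constructor
    · rintro ⟨⟨o, ho, rfl⟩, hval⟩
      exact ⟨o, (PySem.List.sorted_perm other_intervals (fun x => pvGet x 0) false).mem_iff.mp ho,
        of_decide_eq_true hval, rfl⟩
    · rintro ⟨o, ho, hval, rfl⟩
      exact ⟨⟨o, (PySem.List.sorted_perm other_intervals (fun x => pvGet x 0) false).mem_iff.mpr ho,
        rfl⟩, decide_eq_true hval⟩
  have hinitNF : pvNF (if lo ≤ hi then [(lo, hi)] else []) := by
    split_ifs with h
    · refine ⟨List.pairwise_singleton _ _, ?_⟩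
      intro p hp
      rw [List.mem_singleton] at hp
      subst hp
      exact h
    · exact ⟨List.Pairwise.nil, fun p hp => absurd hp List.not_mem_nil⟩
  apply pvNF_unique
  · exact (pvNF_gapsP hi pairsA lo hsortedA hboundA).1
  · exact pvNF_foldP other_intervals _ hinitNF
  · intro x
    rw [pvCovers_gapsP hi x pairsA lo hsortedA hboundA, pvCovers_foldP]
    have hinitCov : pvCovers (if lo ≤ hi then [(lo, hi)] else []) x ↔ (lo ≤ x ∧ x ≤ hi) := by
      split_ifs with h
      · simp only [pvCovers, List.mem_singleton]
        constructor
        · rintro ⟨p, rfl, h1, h2⟩; exact ⟨h1, h2⟩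
        · rintro ⟨h1, h2⟩; exact ⟨(lo, hi), rfl, h1, h2⟩
      · constructor
        · rintro ⟨p, hp, _⟩; exact absurd hp List.not_mem_nil
        · rintro ⟨h1, h2⟩; omega
    rw [hinitCov]
    constructor
    · rintro ⟨h1, h2, h3⟩
      refine ⟨⟨h1, h2⟩, ?_⟩
      intro o ho hcontra
      have hval : max lo (pvGet o 0) ≤ min hi (pvGet o 1) := by omega
      have := h3 _ ((hmemA _).mpr ⟨o, ho, hval, rfl⟩)
      simp at this
      omega
    · rintro ⟨⟨h1, h2⟩, h3⟩
      refine ⟨h1, h2, ?_⟩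
      intro p hp
      obtain ⟨o, ho, hval, rfl⟩ := (hmemA p).mp hp
      have := h3 o ho
      simp
      omega
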